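-- pv_equiv track=rewrite | github.com/Bruno-1990/SPED-Validator | src/indexer.py | _split_tables_and_text
-- ===== SOURCE A (Python) =====
-- def _split_tables_and_text(section: str) -> tuple[list[str], list[str]]:
--     """Separa blocos de tabela Markdown de blocos de texto."""
--     tables: list[str] = []
--     texts: list[str] = []
--     current_block: list[str] = []
--     in_table = False
--
--     for line in section.split("\n"):
--         is_table_line = line.strip().startswith("|") and "|" in line.strip()[1:]
--
--         if is_table_line and not in_table:
--             # Início de tabela — salvar texto acumulado
--             if current_block:
--                 texts.append("\n".join(current_block))
--                 current_block = []
--             in_table = True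
--             current_block.append(line)
--         elif is_table_line and in_table:
--             current_block.append(line)
--         elif not is_table_line and in_table:
--             # Fim de tabela
--             tables.append("\n".join(current_block))
--             current_block = [line] if line.strip() else []
--             in_table = False
--         else:
--             current_block.append(line)
--
--     # Bloco final
--     if current_block:
--         if in_table:
--             tables.append("\n".join(current_block))
--         else:
--             texts.append("\n".join(current_block))
--
--     return tables, texts
-- ===== SOURCE B (Python) =====
-- def _split_tables_and_text(section: str) -> tuple[list[str], list[str]]:
--     """Separa blocos de tabela Markdown de blocos de texto (group-then-map over maximal runs)."""
--     def is_table_line(line: str) -> bool: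
--         s = line.strip()
--         return s.startswith("|") and "|" in s[1:]
--
--     lines = section.split("\n")
--     tables: list[str] = []
--     texts: list[str] = []
--     n = len(lines)
--     i = 0
--     first = True
--     while i < n:
--         kind = is_table_line(lines[i])
--         j = i + 1
--         while j < n and is_table_line(lines[j]) == kind:
--             j += 1
--         run = lines[i:j]
--         if kind:
--             tables.append("\n".join(run))
--         else:
--             if not first and not run[0].strip():
--                 run = run[1:]
--             if run:
--                 texts.append("\n".join(run))
--         first = False
--         i = j
--     return tables, texts
-- ===== Notes on version B (the rewrite author's own statement) =====
-- stated objective: alternative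
-- what changed: Replaced A's flush-on-transition state machine (in_table flag plus a mutable current_block flushed at each kind change and at the end) by a group-then-map pass: scan maximal runs of same-kind lines with an inner span, join each table run directly, and for each non-first text run drop its leading blank line before joining.
import Mathlib
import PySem

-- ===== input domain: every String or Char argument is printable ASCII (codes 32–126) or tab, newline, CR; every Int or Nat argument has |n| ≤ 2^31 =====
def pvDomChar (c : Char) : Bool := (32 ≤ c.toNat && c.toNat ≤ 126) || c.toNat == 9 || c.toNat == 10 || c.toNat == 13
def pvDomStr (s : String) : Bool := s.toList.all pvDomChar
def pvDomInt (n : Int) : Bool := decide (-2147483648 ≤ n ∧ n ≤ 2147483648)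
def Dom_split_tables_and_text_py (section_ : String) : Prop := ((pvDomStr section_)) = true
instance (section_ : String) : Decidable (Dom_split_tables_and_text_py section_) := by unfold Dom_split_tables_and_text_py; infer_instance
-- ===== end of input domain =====

-- B replaces A's flush-on-transition state machine by a span-based group-then-map pass over maximal runs (objective: alternative decomposition, same cost).

-- ===== PORT A =====
-- loop state: (tables, texts, current_block, in_table)
def pvStepA (st : List String × List String × List String × Bool) (line : String) :
    List String × List String × List String × Bool :=
  let tables := st.1
  let texts := st.2.1
  let cur := st.2.2.1
  let inTable := st.2.2.2
  -- is_table_line = line.strip().startswith("|") and "|" in line.strip()[1:]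
  let isTableLine := PySem.Str.startswith (PySem.Str.strip line) "|" &&
      PySem.Str.isIn "|" (PySem.Str.slice (PySem.Str.strip line) (some 1) none)
  if isTableLine && !inTable then
    (tables, (if cur.isEmpty then texts else texts ++ [PySem.Str.join "\n" cur]), [line], true)
  else if isTableLine && inTable then
    (tables, texts, cur ++ [line], true)
  else if !isTableLine && inTable then
    (tables ++ [PySem.Str.join "\n" cur], texts,
      (if PySem.Str.strip line == "" then [] else [line]), false)
  else
    (tables, texts, cur ++ [line], false)

-- the final `if current_block:` block of A
def pvFinA (st : List String × List String × List String × Bool) : List String × List String :=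
  if st.2.2.1.isEmpty then (st.1, st.2.1)
  else if st.2.2.2 then (st.1 ++ [PySem.Str.join "\n" st.2.2.1], st.2.1)
  else (st.1, st.2.1 ++ [PySem.Str.join "\n" st.2.2.1])

-- section.split("\n"): the separator is the non-empty literal "\n", so split? is always `some`
def split_tables_and_text_py (section_ : String) : List String × List String :=
  pvFinA (((PySem.Str.split? section_ "\n").getD []).foldl pvStepA ([], [], [], false))

-- ===== PORT B =====
def pvIsTableLine (line : String) : Bool :=
  let s := PySem.Str.strip line
  PySem.Str.startswith s "|" && PySem.Str.isIn "|" (PySem.Str.slice s (some 1) none)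

-- B's while loop: one recursive step per maximal run (the inner scan = takeWhile/dropWhile span)
def pvGroupsB : List String → Bool → List String × List String
  | [], _ => ([], [])
  | l :: ls, first =>
    if pvIsTableLine l then
      let run := l :: ls.takeWhile pvIsTableLine
      let p := pvGroupsB (ls.dropWhile pvIsTableLine) false
      (PySem.Str.join "\n" run :: p.1, p.2)
    else
      let run0 := l :: ls.takeWhile (fun x => !pvIsTableLine x)
      let run := if !first && PySem.Str.strip l == "" then run0.drop 1 else run0
      let p := pvGroupsB (ls.dropWhile (fun x => !pvIsTableLine x)) false
      (p.1, if run.isEmpty then p.2 else PySem.Str.join "\n" run :: p.2)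
termination_by ls _ => ls.length
decreasing_by
  all_goals simp only [List.length_cons]
  all_goals exact Nat.lt_succ_of_le (List.length_dropWhile_le _ _)

def split_tables_and_text_py_alt (section_ : String) : List String × List String :=
  pvGroupsB ((PySem.Str.split? section_ "\n").getD []) true

-- ===== PRECONDITION & SPEC =====
def Spec_split_tables_and_text_py (section_ : String) (out : List String × List String) : Prop := out = split_tables_and_text_py_alt section_
instance (section_ : String) (out : List String × List String) : Decidable (Spec_split_tables_and_text_py section_ out) := by unfold Spec_split_tables_and_text_py; infer_instance

-- ===== CLAIM (what is proved, stated in full; the proofs are below) =====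
def Claim_equal_split_tables_and_text_py : Prop := ∀ (section_ : String), Dom_split_tables_and_text_py section_ → Spec_split_tables_and_text_py section_ (split_tables_and_text_py section_)

-- ===== LEMMAS AND PROOFS =====

-- what B computes on the remaining lines when A is mid-text-block with accumulated `cur`
def pvBtext (cur ms : List String) : List String × List String :=
  let bl := cur ++ ms.takeWhile (fun x => !pvIsTableLine x)
  let p := pvGroupsB (ms.dropWhile (fun x => !pvIsTableLine x)) false
  (p.1, if bl.isEmpty then p.2 else PySem.Str.join "\n" bl :: p.2)

-- what B computes on the remaining lines when A is mid-table with accumulated `cur`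
def pvBtab (cur ms : List String) : List String × List String :=
  let p := pvGroupsB (ms.dropWhile pvIsTableLine) false
  (PySem.Str.join "\n" (cur ++ ms.takeWhile pvIsTableLine) :: p.1, p.2)

lemma pv_brec_text (m : String) (ms : List String) (hm : pvIsTableLine m = false) :
    pvGroupsB (m :: ms) false =
      pvBtext (if PySem.Str.strip m == "" then [] else [m]) ms := by
  rw [pvGroupsB]
  by_cases h1 : (PySem.Str.strip m == "") = true
  · simp [hm, h1, pvBtext]
  · simp [hm, h1, pvBtext]

lemma pv_brec_tab (m : String) (ms : List String) (f : Bool) (hm : pvIsTableLine m = true) :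
    pvGroupsB (m :: ms) f = pvBtab [m] ms := by
  rw [pvGroupsB]
  simp [hm, pvBtab]

lemma pv_groups_true_eq_btext (ls : List String) : pvGroupsB ls true = pvBtext [] ls := by
  cases ls with
  | nil => simp [pvGroupsB, pvBtext]
  | cons l ls =>
    by_cases hl : pvIsTableLine l = true
    · rw [pv_brec_tab _ _ _ hl, pvBtext]
      simp [hl, pv_brec_tab _ _ _ hl, pvBtab]
    · simp only [Bool.not_eq_true] at hl
      rw [pvGroupsB, pvBtext]
      simp [hl]

lemma pvStepA_cases (st : List String × List String × List String × Bool) (m : String) :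
    pvStepA st m =
      (if pvIsTableLine m && !st.2.2.2 then
        (st.1, (if st.2.2.1.isEmpty then st.2.1 else st.2.1 ++ [PySem.Str.join "\n" st.2.2.1]),
          [m], true)
      else if pvIsTableLine m && st.2.2.2 then
        (st.1, st.2.1, st.2.2.1 ++ [m], true)
      else if !pvIsTableLine m && st.2.2.2 then
        (st.1 ++ [PySem.Str.join "\n" st.2.2.1], st.2.1,
          (if PySem.Str.strip m == "" then [] else [m]), false)
      else
        (st.1, st.2.1, st.2.2.1 ++ [m], false)) := rfl

lemma pvStepA_tab_in (t x cur : List String) (m : String) (hm : pvIsTableLine m = true) :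
    pvStepA (t, x, cur, true) m = (t, x, cur ++ [m], true) := by
  rw [pvStepA_cases, hm]; simp

lemma pvStepA_tab_out (t x cur : List String) (m : String) (hm : pvIsTableLine m = true) :
    pvStepA (t, x, cur, false) m =
      (t, (if cur.isEmpty then x else x ++ [PySem.Str.join "\n" cur]), [m], true) := by
  rw [pvStepA_cases, hm]; simp

lemma pvStepA_text_in (t x cur : List String) (m : String) (hm : pvIsTableLine m = false) :
    pvStepA (t, x, cur, true) m =
      (t ++ [PySem.Str.join "\n" cur], x,
        (if PySem.Str.strip m == "" then [] else [m]), false) := by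
  rw [pvStepA_cases, hm]; simp

lemma pvStepA_text_out (t x cur : List String) (m : String) (hm : pvIsTableLine m = false) :
    pvStepA (t, x, cur, false) m = (t, x, cur ++ [m], false) := by
  rw [pvStepA_cases, hm]; simp

lemma pv_main_nil (t x cur : List String) (b : Bool) (hb : b = true → cur ≠ []) :
    pvFinA (([] : List String).foldl pvStepA (t, x, cur, b)) =
      (t ++ (if b then pvBtab cur [] else pvBtext cur []).1,
       x ++ (if b then pvBtab cur [] else pvBtext cur []).2) := by
  cases b with
  | true =>
    have := hb rfl
    simp [pvFinA, pvBtab, pvGroupsB, this]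
  | false =>
    cases cur with
    | nil => simp [pvFinA, pvBtext, pvGroupsB]
    | cons c cs => simp [pvFinA, pvBtext, pvGroupsB]

lemma pv_main (n : Nat) : ∀ (ms : List String), ms.length ≤ n →
    ∀ (t x cur : List String) (b : Bool), (b = true → cur ≠ []) →
    pvFinA (ms.foldl pvStepA (t, x, cur, b)) =
      (t ++ (if b then pvBtab cur ms else pvBtext cur ms).1,
       x ++ (if b then pvBtab cur ms else pvBtext cur ms).2) := by
  induction n with
  | zero =>
    intro ms h t x cur b hb
    have hms : ms = [] := List.length_eq_zero_iff.mp (Nat.le_zero.mp h)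
    subst hms
    exact pv_main_nil t x cur b hb
  | succ n ih =>
    intro ms h t x cur b hb
    cases ms with
    | nil => exact pv_main_nil t x cur b hb
    | cons m ms' =>
      have h' : ms'.length ≤ n := by simpa using Nat.succ_le_succ_iff.mp h
      rw [List.foldl_cons]
      by_cases hm : pvIsTableLine m = true
      · cases b with
        | true =>
          rw [pvStepA_tab_in t x cur m hm, ih ms' h' t x (cur ++ [m]) true (by simp)]
          simp [pvBtab, hm, List.append_assoc]
        | false =>
          rw [pvStepA_tab_out t x cur m hm,
            ih ms' h' t (if cur.isEmpty then x else x ++ [PySem.Str.join "\n" cur]) [m] true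
              (by simp)]
          have htw : List.takeWhile (fun x => !pvIsTableLine x) (m :: ms') = [] := by
            simp [hm]
          have hdw : List.dropWhile (fun x => !pvIsTableLine x) (m :: ms') = m :: ms' := by
            simp [hm]
          rw [if_pos rfl]
          simp only [Bool.false_eq_true, if_false, pvBtext, htw, hdw,
            pv_brec_tab m ms' false hm]
          cases cur with
          | nil => simp
          | cons c cs => simp
      · simp only [Bool.not_eq_true] at hm
        cases b with
        | true =>
          rw [pvStepA_text_in t x cur m hm,
            ih ms' h' (t ++ [PySem.Str.join "\n" cur]) x
              (if PySem.Str.strip m == "" then [] else [m]) false (by simp)]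
          have htw : List.takeWhile pvIsTableLine (m :: ms') = [] := by simp [hm]
          have hdw : List.dropWhile pvIsTableLine (m :: ms') = m :: ms' := by simp [hm]
          simp only [Bool.false_eq_true, if_false, pvBtab, htw, hdw,
            pv_brec_text m ms' hm]
          simp
        | false =>
          rw [pvStepA_text_out t x cur m hm, ih ms' h' t x (cur ++ [m]) false (by simp)]
          simp [pvBtext, hm, List.append_assoc]

-- ===== VERDICT (by name: the statement is the Claim_ definition above) =====
theorem split_tables_and_text_py_spec : Claim_equal_split_tables_and_text_py := by
  intro s _
  unfold Spec_split_tables_and_text_py split_tables_and_text_py split_tables_and_text_py_alt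
  rw [pv_main ((PySem.Str.split? s "\n").getD []).length _ (Nat.le_refl _) [] [] [] false
    (by simp)]
  simp [pv_groups_true_eq_btext]
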